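-- pv_equiv track=rewrite | github.com/diyagangwar1/wildfire_sim | tests/test_controller_logic.py | _find_best_pair
-- ===== SOURCE A (Python) =====
-- def _find_best_pair(thermal_buf, imagery_buf, threshold_ns: int):
--     """
--     Mirror of try_evaluate's matching loop, extracted for unit testing.
--     Returns (best_t, best_i, best_dt_ns) or (None, None, threshold_ns+1).
--     """
--     best_t = best_i = None
--     best_dt = threshold_ns + 1
--     for t in thermal_buf:
--         t_tx = int(t.get("tx_ns", 0) or 0)
--         for i in imagery_buf:
--             i_tx = int(i.get("tx_ns", 0) or 0)
--             dt = abs(t_tx - i_tx)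
--             if dt < best_dt:
--                 best_dt = dt
--                 best_t, best_i = t, i
--     if best_t is None or best_dt > threshold_ns:
--         return None, None, best_dt
--     return best_t, best_i, best_dt
-- ===== SOURCE B (Python) =====
-- def _bisect_left(a, x):
--     lo, hi = 0, len(a)
--     while lo < hi:
--         mid = (lo + hi) // 2
--         if a[mid] < x:
--             lo = mid + 1
--         else:
--             hi = mid
--     return lo
--
--
-- def _nearest(svals, x):
--     """Distance from x to the closest value in the sorted non-empty list svals."""
--     j = _bisect_left(svals, x)
--     if j == len(svals):
--         return x - svals[-1]
--     if j == 0: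
--         return svals[0] - x
--     return min(svals[j] - x, x - svals[j - 1])
--
--
-- def _find_best_pair(thermal_buf, imagery_buf, threshold_ns: int):
--     if not thermal_buf or not imagery_buf:
--         return None, None, threshold_ns + 1
--     tvals = [int(t.get("tx_ns", 0) or 0) for t in thermal_buf]
--     svals = sorted(int(i.get("tx_ns", 0) or 0) for i in imagery_buf)
--     d = min(_nearest(svals, x) for x in tvals)
--     if d > threshold_ns:
--         return None, None, threshold_ns + 1
--     # Resolve the earliest pair achieving distance d: first imagery occurrence per value...
--     first = {}
--     for idx, i in enumerate(imagery_buf):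
--         v = int(i.get("tx_ns", 0) or 0)
--         if v not in first:
--             first[v] = (idx, i)
--     # ...then the first thermal sample with a partner at distance d.
--     for t, x in zip(thermal_buf, tvals):
--         lo = first.get(x - d)
--         hi = first.get(x + d)
--         if lo is None and hi is None:
--             continue
--         if hi is None or (lo is not None and lo[0] <= hi[0]):
--             return t, lo[1], d
--         return t, hi[1], d
--     return None, None, threshold_ns + 1  # unreachable: d is achieved by some pair
-- ===== Notes on version B (the rewrite author's own statement) =====
-- stated objective: alternative
-- what changed: Replaces the nested all-pairs scan with sort + per-sample binary search to find the minimal |tx_ns| gap, then resolves A's earliest-pair tie-break with a first-occurrence index map instead of re-scanning all pairs (O((n+m)log(n+m)) vs O(n*m); measured 1.48x at the largest timed size, below the 1.5x bar, so not claimed as faster).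
import Mathlib
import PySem

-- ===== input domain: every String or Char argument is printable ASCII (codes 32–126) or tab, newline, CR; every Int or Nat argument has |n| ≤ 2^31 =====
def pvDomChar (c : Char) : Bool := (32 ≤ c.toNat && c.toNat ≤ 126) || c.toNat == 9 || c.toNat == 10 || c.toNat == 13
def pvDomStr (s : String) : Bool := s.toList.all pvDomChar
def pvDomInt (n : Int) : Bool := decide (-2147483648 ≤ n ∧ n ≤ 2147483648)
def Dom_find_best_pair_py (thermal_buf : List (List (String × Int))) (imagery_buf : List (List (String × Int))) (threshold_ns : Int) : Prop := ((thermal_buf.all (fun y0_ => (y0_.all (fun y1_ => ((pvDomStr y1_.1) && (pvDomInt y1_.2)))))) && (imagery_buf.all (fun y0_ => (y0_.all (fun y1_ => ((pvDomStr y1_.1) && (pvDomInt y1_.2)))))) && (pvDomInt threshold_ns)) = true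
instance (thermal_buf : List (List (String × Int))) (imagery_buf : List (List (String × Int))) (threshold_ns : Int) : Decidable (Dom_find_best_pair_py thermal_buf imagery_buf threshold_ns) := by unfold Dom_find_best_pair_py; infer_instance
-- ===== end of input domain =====

-- B finds the minimal |tx_ns| gap by sort + per-sample binary search instead of A's nested
-- all-pairs scan, and resolves A's earliest-pair tie-break with a first-occurrence index map.

-- shared input decoding: int(d.get("tx_ns", 0) or 0)
def pvTx (d : List (String × Int)) : Int :=
  let v := PySem.Dict.getD (PySem.Dict.mk d) "tx_ns" 0
  if v = 0 then 0 else v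

-- ===== PORT A =====
def find_best_pair_py (thermal_buf : List (List (String × Int))) (imagery_buf : List (List (String × Int))) (threshold_ns : Int) : (Option (List (String × Int))) × (Option (List (String × Int))) × Int :=
  let st := thermal_buf.foldl (fun st t =>
      let t_tx := pvTx t
      imagery_buf.foldl (fun st i =>
        let i_tx := pvTx i
        let dt := |t_tx - i_tx|
        if dt < st.2.2 then (some t, some i, dt) else st) st)
    ((none, none, threshold_ns + 1) : (Option (List (String × Int))) × (Option (List (String × Int))) × Int)
  if st.1 = none ∨ threshold_ns < st.2.2 then (none, none, st.2.2) else st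

-- ===== PORT B =====
-- _nearest: distance from x to the closest value of the sorted non-empty list svals
-- (the hand-written _bisect_left of Source B is exactly the bisect_left loop = PySem.List.bisectLeft)
def pvNearest (svals : List Int) (x : Int) : Int :=
  let j := PySem.List.bisectLeft svals x
  if j = svals.length then x - PySem.List.pyGetD svals (-1) 0
  else if j = 0 then PySem.List.pyGetD svals 0 0 - x
  else min (PySem.List.pyGetD svals (j : Int) 0 - x) (x - PySem.List.pyGetD svals ((j : Int) - 1) 0)

-- first : value -> (first index, first element) over imagery_buf
def pvFirstMap (imagery_buf : List (List (String × Int))) : PySem.Dict Int (Int × List (String × Int)) :=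
  (PySem.List.enumerate imagery_buf 0).foldl
    (fun first p =>
      let v := pvTx p.2
      if first.contains v then first else first.insert v (p.1, p.2))
    PySem.Dict.empty

-- the final 'for t, x in zip(...)' loop of Source B
def pvScan (first : PySem.Dict Int (Int × List (String × Int))) (d : Int) (threshold_ns : Int) :
    List (List (String × Int) × Int) → (Option (List (String × Int))) × (Option (List (String × Int))) × Int
  | [] => (none, none, threshold_ns + 1)
  | (t, x) :: rest =>
    match first.get? (x - d), first.get? (x + d) with
    | none, none => pvScan first d threshold_ns rest
    | some lo, none => (some t, some lo.2, d)
    | none, some hi => (some t, some hi.2, d)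
    | some lo, some hi => if lo.1 ≤ hi.1 then (some t, some lo.2, d) else (some t, some hi.2, d)

def find_best_pair_py_alt (thermal_buf : List (List (String × Int))) (imagery_buf : List (List (String × Int))) (threshold_ns : Int) : (Option (List (String × Int))) × (Option (List (String × Int))) × Int :=
  if thermal_buf = [] ∨ imagery_buf = [] then (none, none, threshold_ns + 1) else
  let tvals := thermal_buf.map pvTx
  let svals := PySem.List.sorted (imagery_buf.map pvTx) (fun v => v) false
  match PySem.List.min? (tvals.map (fun x => pvNearest svals x)) (fun v => v) with
  | none => (none, none, threshold_ns + 1)   -- unreachable: tvals is non-empty here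
  | some d =>
    if threshold_ns < d then (none, none, threshold_ns + 1)
    else pvScan (pvFirstMap imagery_buf) d threshold_ns (thermal_buf.zip tvals)

-- ===== PRECONDITION & SPEC =====
def Spec_find_best_pair_py (thermal_buf : List (List (String × Int))) (imagery_buf : List (List (String × Int))) (threshold_ns : Int) (out : (Option (List (String × Int))) × (Option (List (String × Int))) × Int) : Prop := out = find_best_pair_py_alt thermal_buf imagery_buf threshold_ns
instance (thermal_buf : List (List (String × Int))) (imagery_buf : List (List (String × Int))) (threshold_ns : Int) (out : (Option (List (String × Int))) × (Option (List (String × Int))) × Int) : Decidable (Spec_find_best_pair_py thermal_buf imagery_buf threshold_ns out) := by unfold Spec_find_best_pair_py; infer_instance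

-- ===== CLAIM (what is proved, stated in full; the proofs are below) =====
def Claim_equal_find_best_pair_py : Prop := ∀ (thermal_buf : List (List (String × Int))) (imagery_buf : List (List (String × Int))) (threshold_ns : Int), Dom_find_best_pair_py thermal_buf imagery_buf threshold_ns → Spec_find_best_pair_py thermal_buf imagery_buf threshold_ns (find_best_pair_py thermal_buf imagery_buf threshold_ns)

-- ===== LEMMAS AND PROOFS =====

-- the list of all candidate triples (dt, t, i), in A's scan order
def pvCands (tb ib : List (List (String × Int))) : List (Int × List (String × Int) × List (String × Int)) :=
  tb.flatMap (fun t => ib.map (fun i => (|pvTx t - pvTx i|, t, i)))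

def pvStep (st : (Option (List (String × Int))) × (Option (List (String × Int))) × Int)
    (c : Int × List (String × Int) × List (String × Int)) :
    (Option (List (String × Int))) × (Option (List (String × Int))) × Int :=
  if c.1 < st.2.2 then (some c.2.1, some c.2.2, c.1) else st

def pvM (l : List (Int × List (String × Int) × List (String × Int))) (b0 : Int) : Int :=
  (l.map (·.1)).foldl min b0
theorem pvM_cons (c : Int × List (String × Int) × List (String × Int)) (l) (b0 : Int) :
    pvM (c :: l) b0 = pvM l (min b0 c.1) := rfl

theorem pvM_le_init (l : List (Int × List (String × Int) × List (String × Int))) (b0 : Int) :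
    pvM l b0 ≤ b0 := by
  induction l generalizing b0 with
  | nil => simp [pvM]
  | cons c l ih => rw [pvM_cons]; exact le_trans (ih _) (min_le_left _ _)

theorem pvM_le_mem {l : List (Int × List (String × Int) × List (String × Int))} {b0 : Int}
    {c : Int × List (String × Int) × List (String × Int)} (hc : c ∈ l) : pvM l b0 ≤ c.1 := by
  induction l generalizing b0 with
  | nil => cases hc
  | cons c' l ih =>
    rw [pvM_cons]
    rcases List.mem_cons.1 hc with h | h
    · subst h; exact le_trans (pvM_le_init _ _) (min_le_right _ _)
    · exact ih h

theorem pvM_cases (l : List (Int × List (String × Int) × List (String × Int))) (b0 : Int) :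
    pvM l b0 = b0 ∨ ∃ c ∈ l, pvM l b0 = c.1 := by
  induction l generalizing b0 with
  | nil => exact Or.inl rfl
  | cons c l ih =>
    rw [pvM_cons]
    rcases ih (min b0 c.1) with h | ⟨c', hc', h⟩
    · rcases min_choice b0 c.1 with hm | hm
      · exact Or.inl (h.trans hm)
      · exact Or.inr ⟨c, List.mem_cons_self, h.trans hm⟩
    · exact Or.inr ⟨c', List.mem_cons_of_mem _ hc', h⟩

theorem fold_eq_cands (tb ib : List (List (String × Int)))
    (init : (Option (List (String × Int))) × (Option (List (String × Int))) × Int) :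
    tb.foldl (fun st t =>
      ib.foldl (fun st i =>
        if |pvTx t - pvTx i| < st.2.2 then (some t, some i, |pvTx t - pvTx i|) else st) st) init
    = (pvCands tb ib).foldl pvStep init := by
  simp [pvCands, List.foldl_flatMap, List.foldl_map, pvStep]

theorem foldS1 {l : List (Int × List (String × Int) × List (String × Int))}
    {t0 i0 : Option (List (String × Int))} {b0 : Int} (h : ∀ c ∈ l, ¬ c.1 < b0) :
    l.foldl pvStep (t0, i0, b0) = (t0, i0, b0) := by
  induction l with
  | nil => rfl
  | cons c l ih =>
    rw [List.foldl_cons]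
    have hc := h c List.mem_cons_self
    simp only [pvStep, if_neg hc]
    exact ih (fun c' hc' => h c' (List.mem_cons_of_mem _ hc'))
theorem pvM_ge {l : List (Int × List (String × Int) × List (String × Int))} {b0 : Int}
    (h : ∀ c ∈ l, b0 ≤ c.1) : b0 ≤ pvM l b0 := by
  induction l generalizing b0 with
  | nil => exact le_refl _
  | cons c l ih =>
    rw [pvM_cons, min_eq_left (h c List.mem_cons_self)]
    exact ih (fun c' hc' => h c' (List.mem_cons_of_mem _ hc'))

theorem foldA_char (l : List (Int × List (String × Int) × List (String × Int)))
    (t0 i0 : Option (List (String × Int))) (b0 : Int) (h : ∃ c ∈ l, c.1 < b0) :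
    l.foldl pvStep (t0, i0, b0)
      = match l.find? (fun c => decide (c.1 = pvM l b0)) with
        | some c => (some c.2.1, some c.2.2, c.1)
        | none => (t0, i0, b0) := by
  induction l generalizing t0 i0 b0 with
  | nil => obtain ⟨c, hc, _⟩ := h; cases hc
  | cons c l ih =>
    rw [List.foldl_cons, List.find?_cons]
    by_cases hc : c.1 < b0
    · have hmin : min b0 c.1 = c.1 := min_eq_right (le_of_lt hc)
      have hstep : pvStep (t0, i0, b0) c = (some c.2.1, some c.2.2, c.1) := by
        simp [pvStep, hc]
      rw [hstep]
      by_cases h2 : ∃ c' ∈ l, c'.1 < c.1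
      · obtain ⟨c', hc', hlt⟩ := h2
        have hMlt : pvM l c.1 < c.1 := lt_of_le_of_lt (pvM_le_mem hc') hlt
        have hhead : ¬ (c.1 = pvM (c :: l) b0) := by
          rw [pvM_cons, hmin]; omega
        rw [decide_eq_false hhead]
        have hMl : pvM (c :: l) b0 = pvM l c.1 := by rw [pvM_cons, hmin]
        rw [hMl]
        simp only []
        have hmem : ∃ c'' ∈ l, pvM l c.1 = c''.1 := by
          rcases pvM_cases l c.1 with heq | hmem
          · omega
          · exact hmem
        obtain ⟨c'', hc'', heq''⟩ := hmem
        have hsome : (l.find? (fun x => decide (x.1 = pvM l c.1))).isSome := by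
          rw [List.find?_isSome]
          exact ⟨c'', hc'', by simpa using heq''.symm⟩
        obtain ⟨cf, hcf⟩ := Option.isSome_iff_exists.1 hsome
        rw [ih _ _ _ ⟨c', hc', hlt⟩, hcf]
      · push Not at h2
        have hall : ∀ c' ∈ l, ¬ c'.1 < c.1 := fun c' hc' => not_lt.2 (h2 c' hc')
        rw [foldS1 hall]
        have hM : pvM (c :: l) b0 = c.1 := by
          rw [pvM_cons, hmin]
          exact le_antisymm (pvM_le_init _ _) (pvM_ge (fun c' hc' => h2 c' hc'))
        rw [decide_eq_true hM.symm]
    · have hstep : pvStep (t0, i0, b0) c = (t0, i0, b0) := by simp [pvStep, hc]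
      rw [hstep]
      obtain ⟨c', hc', hlt⟩ := h
      have hc'l : c' ∈ l := by
        rcases List.mem_cons.1 hc' with he | hm
        · subst he; omega
        · exact hm
      have hmin : min b0 c.1 = b0 := min_eq_left (not_lt.1 hc)
      have hMl : pvM (c :: l) b0 = pvM l b0 := by rw [pvM_cons, hmin]
      have hhead : ¬ (c.1 = pvM (c :: l) b0) := by
        have : pvM l b0 ≤ c'.1 := pvM_le_mem hc'l
        rw [hMl]; omega
      rw [decide_eq_false hhead, hMl, ih _ _ _ ⟨c', hc'l, hlt⟩]
theorem pyGetD_neg_one (l : List Int) (h : 0 < l.length) :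
    PySem.List.pyGetD l (-1) 0 = l[l.length - 1]'(by omega) := by
  have h1 : (1:Int) ≤ l.length := by exact_mod_cast h
  simp [PySem.List.pyGetD, PySem.List.pyGet?, PySem.List.pyIdx?, h1]
  rw [List.getElem?_eq_getElem (by omega)]
  rfl

theorem pvNearest_spec {s : List Int} (hs : s.Pairwise (· ≤ ·)) (hne : s ≠ []) (x : Int) :
    (∃ v ∈ s, pvNearest s x = |v - x|) ∧ ∀ v ∈ s, pvNearest s x ≤ |v - x| := by
  have hn : 0 < s.length := List.length_pos_iff.2 hne
  obtain ⟨hjle, hlo, hhi⟩ := PySem.List.bisectLeft_spec s x hs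
  have hmono : ∀ (k1 k2 : ℕ) (h1 : k1 < s.length) (h2 : k2 < s.length), k1 ≤ k2 →
      s[k1] ≤ s[k2] := by
    intro k1 k2 h1 h2 hle
    rcases Nat.lt_or_ge k1 k2 with hlt | hge
    · exact List.pairwise_iff_getElem.1 hs k1 k2 h1 h2 hlt
    · have : k1 = k2 := le_antisymm hle hge
      subst this; exact le_refl _
  set j := PySem.List.bisectLeft s x with hj
  unfold pvNearest
  rw [← hj]
  by_cases hjn : j = s.length
  · rw [if_pos hjn, pyGetD_neg_one s hn]
    have hlast : s[s.length - 1]'(by omega) < x := hlo _ (by omega) (by omega)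
    constructor
    · exact ⟨s[s.length - 1]'(by omega), List.getElem_mem _, by rw [abs_of_nonpos (by omega)]; ring⟩
    · intro v hv
      obtain ⟨k, hk, rfl⟩ := List.mem_iff_getElem.1 hv
      have h1 : s[k] < x := hlo _ hk (by omega)
      have h2 : s[k] ≤ s[s.length - 1]'(by omega) := hmono _ _ hk (by omega) (by omega)
      rw [abs_of_nonpos (by omega)]; omega
  · rw [if_neg hjn]
    have hjlt : j < s.length := lt_of_le_of_ne hjle hjn
    by_cases hj0 : j = 0
    · rw [if_pos hj0]
      have h0 : x ≤ s[0]'hn := hhi _ hn (by omega)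
      have hget : PySem.List.pyGetD s 0 0 = s[0]'hn := by
        rw [PySem.List.pyGetD_eq_getElem s 0 (by omega) (by exact_mod_cast hn)]; rfl
      rw [hget]
      constructor
      · exact ⟨s[0]'hn, List.getElem_mem _, by rw [abs_of_nonneg (by omega)]⟩
      · intro v hv
        obtain ⟨k, hk, rfl⟩ := List.mem_iff_getElem.1 hv
        have h1 : x ≤ s[k] := hhi _ hk (by omega)
        have h2 : s[0]'hn ≤ s[k] := hmono _ _ hn hk (by omega)
        rw [abs_of_nonneg (by omega)]; omega
    · rw [if_neg hj0]
      have hjm : j - 1 < s.length := by omega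
      have hgj : PySem.List.pyGetD s (j : Int) 0 = s[j]'hjlt := by
        rw [PySem.List.pyGetD_eq_getElem s 0 (by omega) (by exact_mod_cast hjlt)]
        simp
      have hgjm : PySem.List.pyGetD s ((j : Int) - 1) 0 = s[j-1]'hjm := by
        have : (j : Int) - 1 = ((j - 1 : ℕ) : Int) := by omega
        rw [this, PySem.List.pyGetD_eq_getElem s 0 (by omega) (by exact_mod_cast hjm)]
        simp
      rw [hgj, hgjm]
      have hxj : x ≤ s[j]'hjlt := hhi _ hjlt (by omega)
      have hxjm : s[j-1]'hjm < x := hlo _ hjm (by omega)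
      constructor
      · rcases le_total (s[j]'hjlt - x) (x - s[j-1]'hjm) with hle | hle
        · exact ⟨s[j]'hjlt, List.getElem_mem _, by rw [min_eq_left hle, abs_of_nonneg (by omega)]⟩
        · exact ⟨s[j-1]'hjm, List.getElem_mem _, by rw [min_eq_right hle, abs_of_nonpos (by omega)]; ring⟩
      · intro v hv
        obtain ⟨k, hk, rfl⟩ := List.mem_iff_getElem.1 hv
        rcases Nat.lt_or_ge k j with hkj | hkj
        · have h1 : s[k] < x := hlo _ hk hkj
          have h2 : s[k] ≤ s[j-1]'hjm := hmono _ _ hk hjm (by omega)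
          rw [abs_of_nonpos (by omega)]
          have := min_le_right (s[j]'hjlt - x) (x - s[j-1]'hjm)
          omega
        · have h1 : x ≤ s[k] := hhi _ hk hkj
          have h2 : s[j]'hjlt ≤ s[k] := hmono _ _ hjlt hk hkj
          rw [abs_of_nonneg (by omega)]
          have := min_le_left (s[j]'hjlt - x) (x - s[j-1]'hjm)
          omega
theorem foldFirst_get? (l : List (Int × List (String × Int)))
    (d : PySem.Dict Int (Int × List (String × Int))) (v : Int) :
    (l.foldl (fun first p =>
        let w := pvTx p.2
        if first.contains w then first else first.insert w (p.1, p.2)) d).get? v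
      = match d.get? v with
        | some w => some w
        | none => (l.find? (fun p => decide (pvTx p.2 = v))).map (fun p => (p.1, p.2)) := by
  induction l generalizing d with
  | nil => rw [List.foldl_nil]; cases d.get? v <;> simp
  | cons p l ih =>
    rw [List.foldl_cons, List.find?_cons]
    simp only []
    by_cases hc : d.contains (pvTx p.2) = true
    · rw [if_pos hc]
      by_cases hv : pvTx p.2 = v
      · have hsome : (d.get? v).isSome := by
          rw [← hv, ← PySem.Dict.contains_eq_isSome_get?]; exact hc
        obtain ⟨w, hw⟩ := Option.isSome_iff_exists.1 hsome
        rw [ih d, hw]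
      · rw [decide_eq_false hv, ih d]
    · rw [if_neg hc]
      have hnone : d.get? (pvTx p.2) = none := by
        have := PySem.Dict.contains_eq_isSome_get? d (pvTx p.2)
        cases h : d.get? (pvTx p.2) with
        | none => rfl
        | some w => rw [h] at this; simp [this] at hc
      by_cases hv : pvTx p.2 = v
      · subst hv
        rw [ih _, PySem.Dict.get?_insert_self, hnone, decide_eq_true rfl]
        simp
      · rw [ih _, PySem.Dict.get?_insert_of_ne _ _ (fun h => hv h.symm), decide_eq_false hv]

theorem firstMap_get? (ib : List (List (String × Int))) (v : Int) :
    (pvFirstMap ib).get? v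
      = ((PySem.List.enumerate ib 0).find? (fun p => decide (pvTx p.2 = v))).map (fun p => (p.1, p.2)) := by
  unfold pvFirstMap
  rw [foldFirst_get?, PySem.Dict.get?_empty]

def pvChoose {β : Type} (lo hi : Option (Int × β)) : Option β :=
  match lo, hi with
  | none, none => none
  | some lo, none => some lo.2
  | none, some hi => some hi.2
  | some lo, some hi => if lo.1 ≤ hi.1 then some lo.2 else some hi.2

theorem find?_enumerate_idx {α : Type} {ib : List α} {s : Int} {pred : Int × α → Bool}
    {p : Int × α} (h : (PySem.List.enumerate ib s).find? pred = some p) : s ≤ p.1 := by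
  have hm := List.mem_of_find?_eq_some h
  obtain ⟨k, hk, rfl⟩ := (PySem.List.mem_enumerate_iff ib s p).1 hm
  simp

theorem inner_char (ib : List (List (String × Int))) (x d : Int) (hd : 0 ≤ d) :
    ∀ s : Int,
    pvChoose
      (((PySem.List.enumerate ib s).find? (fun p => decide (pvTx p.2 = x - d))).map (fun p => (p.1, p.2)))
      (((PySem.List.enumerate ib s).find? (fun p => decide (pvTx p.2 = x + d))).map (fun p => (p.1, p.2)))
      = ib.find? (fun i => decide (|x - pvTx i| = d)) := by
  induction ib with
  | nil => intro s; rfl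
  | cons i ib ih =>
    intro s
    rw [PySem.List.enumerate_cons]
    simp only [List.find?_cons]
    by_cases hlo : pvTx i = x - d
    · have h1 : |x - pvTx i| = d := by
        rw [hlo, show x - (x - d) = d from by ring]; exact abs_of_nonneg hd
      rw [decide_eq_true hlo, decide_eq_true h1]
      by_cases hhi : pvTx i = x + d
      · rw [decide_eq_true hhi]
        simp [pvChoose]
      · rw [decide_eq_false hhi]
        cases h : (PySem.List.enumerate ib (s+1)).find? (fun p => decide (pvTx p.2 = x + d)) with
        | none => simp [pvChoose]
        | some p =>
          have hp : s ≤ p.1 := le_trans (by omega) (find?_enumerate_idx h)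
          simp [pvChoose, hp]
    · rw [decide_eq_false hlo]
      by_cases hhi : pvTx i = x + d
      · have h1 : |x - pvTx i| = d := by
          rw [hhi, show x - (x + d) = -d from by ring, abs_neg]; exact abs_of_nonneg hd
        rw [decide_eq_true hhi, decide_eq_true h1]
        cases h : (PySem.List.enumerate ib (s+1)).find? (fun p => decide (pvTx p.2 = x - d)) with
        | none => simp [pvChoose]
        | some p =>
          have hp : ¬ (p.1 ≤ s) := by
            have := find?_enumerate_idx h; omega
          simp [pvChoose, hp]
      · have h1 : ¬ (|x - pvTx i| = d) := by
          intro habs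
          rcases (abs_eq hd).1 habs with h | h
          · exact hhi (by omega)
          · exact hlo (by omega)
        rw [decide_eq_false hhi, decide_eq_false h1]
        simpa using ih (s+1)
theorem pvScan_cons (first : PySem.Dict Int (Int × List (String × Int))) (d th : Int)
    (t : List (String × Int)) (x : Int) (rest : List (List (String × Int) × Int)) :
    pvScan first d th ((t, x) :: rest)
      = match pvChoose (first.get? (x - d)) (first.get? (x + d)) with
        | none => pvScan first d th rest
        | some i => (some t, some i, d) := by
  cases h1 : first.get? (x - d) <;> cases h2 : first.get? (x + d)
  · simp [pvScan, pvChoose, h1, h2]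
  · simp [pvScan, pvChoose, h1, h2]
  · simp [pvScan, pvChoose, h1, h2]
  · simp only [pvScan, pvChoose, h1, h2]
    split_ifs <;> rfl

theorem scan_char (tb ib : List (List (String × Int))) (d th : Int) (hd : 0 ≤ d) :
    pvScan (pvFirstMap ib) d th (tb.zip (tb.map pvTx))
      = match (pvCands tb ib).find? (fun c => decide (c.1 = d)) with
        | some c => (some c.2.1, some c.2.2, d)
        | none => (none, none, th + 1) := by
  induction tb with
  | nil => rfl
  | cons t tb ih =>
    have hzip : ((t :: tb).zip ((t :: tb).map pvTx)) = (t, pvTx t) :: tb.zip (tb.map pvTx) := rfl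
    rw [hzip, pvScan_cons, firstMap_get? ib (pvTx t - d), firstMap_get? ib (pvTx t + d),
        inner_char ib (pvTx t) d hd 0]
    have hcands : pvCands (t :: tb) ib
        = (ib.map (fun i => (|pvTx t - pvTx i|, t, i))) ++ pvCands tb ib := by
      simp [pvCands]
    rw [hcands, List.find?_append, List.find?_map]
    have hpred : ((fun c => decide (c.1 = d)) ∘ (fun i => (|pvTx t - pvTx i|, t, i)))
        = fun i => decide (|pvTx t - pvTx i| = d) := rfl
    rw [hpred]
    cases h : ib.find? (fun i => decide (|pvTx t - pvTx i| = d)) with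
    | none => simpa using ih
    | some i0 => simp
theorem find_best_pair_py_spec' (tb ib : List (List (String × Int))) (th : Int) :
    find_best_pair_py tb ib th = find_best_pair_py_alt tb ib th := by
  by_cases hemp : tb = [] ∨ ib = []
  · have hcnil : pvCands tb ib = [] := by
      rcases hemp with h | h <;> subst h <;> simp [pvCands]
    rw [find_best_pair_py, find_best_pair_py_alt, if_pos hemp]
    simp only [fold_eq_cands, hcnil, List.foldl_nil]
    simp
  · push Not at hemp
    obtain ⟨htb, hib⟩ := hemp
    -- B's sorted imagery values
    have hsvne : PySem.List.sorted (ib.map pvTx) (fun v => v) false ≠ [] := by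
      rw [Ne, PySem.List.sorted_eq_nil_iff]
      simp [hib]
    have hsv : (PySem.List.sorted (ib.map pvTx) (fun v => v) false).Pairwise (· ≤ ·) :=
      PySem.List.sorted_pairwise (ib.map pvTx) (fun v => v)
    set svals := PySem.List.sorted (ib.map pvTx) (fun v => v) false with hsvals
    have hmem_sv : ∀ v, v ∈ svals ↔ v ∈ ib.map pvTx := by
      intro v; rw [hsvals, PySem.List.mem_sorted]
    -- B's minimum
    cases hmin : PySem.List.min? ((tb.map pvTx).map (fun x => pvNearest svals x)) (fun v => v) with
    | none =>
      rw [PySem.List.min?_eq_none_iff] at hmin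
      simp [htb] at hmin
    | some d =>
      have hd_memN := PySem.List.min?_mem hmin
      have hd_minN := PySem.List.min?_isMin hmin
      -- d is the value of some candidate
      have hd_mem : ∃ c ∈ pvCands tb ib, c.1 = d := by
        obtain ⟨x, hx, hxd⟩ := List.mem_map.1 hd_memN
        obtain ⟨t0, ht0, rfl⟩ := List.mem_map.1 hx
        obtain ⟨⟨v, hv, hveq⟩, _⟩ := pvNearest_spec hsv hsvne (pvTx t0)
        obtain ⟨i0, hi0, rfl⟩ := List.mem_map.1 ((hmem_sv v).1 hv)
        refine ⟨(|pvTx t0 - pvTx i0|, t0, i0), ?_, ?_⟩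
        · exact List.mem_flatMap.2 ⟨t0, ht0, List.mem_map.2 ⟨i0, hi0, rfl⟩⟩
        · rw [← hxd, hveq, abs_sub_comm]
      -- d is a lower bound on all candidates
      have hd_min : ∀ c ∈ pvCands tb ib, d ≤ c.1 := by
        intro c hc
        simp only [pvCands, List.mem_flatMap, List.mem_map] at hc
        obtain ⟨t0, ht0, i0, hi0, rfl⟩ := hc
        have h1 : d ≤ pvNearest svals (pvTx t0) := by
          refine hd_minN _ ?_
          exact List.mem_map.2 ⟨pvTx t0, List.mem_map.2 ⟨t0, ht0, rfl⟩, rfl⟩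
        have h2 := (pvNearest_spec hsv hsvne (pvTx t0)).2 (pvTx i0)
          ((hmem_sv _).2 (List.mem_map.2 ⟨i0, hi0, rfl⟩))
        calc d ≤ pvNearest svals (pvTx t0) := h1
          _ ≤ |pvTx i0 - pvTx t0| := h2
          _ = |pvTx t0 - pvTx i0| := abs_sub_comm _ _
      have hd0 : 0 ≤ d := by
        obtain ⟨c, hc, hceq⟩ := hd_mem
        simp only [pvCands, List.mem_flatMap, List.mem_map] at hc
        obtain ⟨t0, -, i0, -, rfl⟩ := hc
        rw [← hceq]; exact abs_nonneg _
      -- unfold B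
      rw [find_best_pair_py_alt, if_neg (by rintro (h | h) <;> [exact htb h; exact hib h])]
      simp only [← hsvals, hmin]
      rw [find_best_pair_py]
      simp only [fold_eq_cands]
      by_cases hth : th < d
      · -- below-threshold case: A never updates
        have hall : ∀ c ∈ pvCands tb ib, ¬ c.1 < th + 1 := by
          intro c hc
          have := hd_min c hc; omega
        rw [foldS1 hall]
        simp [hth]
      · -- a best pair exists within the threshold
        have hx : ∃ c ∈ pvCands tb ib, c.1 < th + 1 := by
          obtain ⟨c, hc, hceq⟩ := hd_mem
          exact ⟨c, hc, by omega⟩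
        rw [foldA_char _ _ _ _ hx]
        have hM : pvM (pvCands tb ib) (th + 1) = d := by
          obtain ⟨c, hc, hceq⟩ := hd_mem
          refine le_antisymm (hceq ▸ pvM_le_mem hc) ?_
          rcases pvM_cases (pvCands tb ib) (th + 1) with h | ⟨c', hc', h⟩
          · have := pvM_le_mem (b0 := th + 1) hc
            omega
          · rw [h]; exact hd_min c' hc'
        rw [hM, if_neg hth, scan_char tb ib d th hd0]
        obtain ⟨c, hc, hceq⟩ := hd_mem
        have hsome : ((pvCands tb ib).find? (fun c => decide (c.1 = d))).isSome := by
          rw [List.find?_isSome]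
          exact ⟨c, hc, by simpa using hceq⟩
        obtain ⟨c0, hc0⟩ := Option.isSome_iff_exists.1 hsome
        have hc0d : c0.1 = d := by simpa using List.find?_some hc0
        simp [hc0, hc0d, hth]

-- ===== VERDICT (by name: the statement is the Claim_ definition above) =====
theorem find_best_pair_py_spec : Claim_equal_find_best_pair_py := by
  intro thermal_buf imagery_buf threshold_ns _
  show find_best_pair_py thermal_buf imagery_buf threshold_ns
      = find_best_pair_py_alt thermal_buf imagery_buf threshold_ns
  exact find_best_pair_py_spec' thermal_buf imagery_buf threshold_ns
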